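-- pv_equiv track=rewrite | github.com/qja1998/SSAFY_algorithm_study | SWEA/모의_역량_테스트/5653_줄기세포배양/kwon.py | show_cell
-- ===== SOURCE A (Python) =====
-- def show_cell(cell_dict):
--     xys = cell_dict.keys()
--     max_x, min_x = max(xys, key=lambda x: x[0])[0], min(xys, key=lambda x: x[0])[0]
--     max_y, min_y = max(xys, key=lambda x: x[1])[1], min(xys, key=lambda x: x[1])[1]
--
--     show_matix = [[0]*(max_x-min_x+1) for _ in range(max_y-min_y+1)]
--     for y in range(max_y-min_y+1):
--         for x in range(max_x-min_x+1):
--             if (x+min_x, y+min_y) not in cell_dict: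
--                 continue
--             show_matix[y][x] = cell_dict[(x+min_x, y+min_y)][-1]
--     return show_matix
-- ===== SOURCE B (Python) =====
-- def show_cell(cell_dict):
--     it = iter(cell_dict)
--     x0, y0 = next(it)
--     min_x = max_x = x0
--     min_y = max_y = y0
--     for x, y in it:
--         if x < min_x:
--             min_x = x
--         if x > max_x:
--             max_x = x
--         if y < min_y:
--             min_y = y
--         if y > max_y:
--             max_y = y
--     show_matix = [[0] * (max_x - min_x + 1) for _ in range(max_y - min_y + 1)]
--     for (cx, cy), val in cell_dict.items():
--         show_matix[cy - min_y][cx - min_x] = val[-1]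
--     return show_matix
-- ===== Notes on version B (the rewrite author's own statement) =====
-- stated objective: alternative
-- what changed: Replaces A's four max/min-with-key passes and full-grid double loop (membership test + dict lookup at every coordinate) by a single running-extrema fold over the keys followed by an allocate-then-scatter pass over cell_dict.items() that writes only the populated cells.
import Mathlib
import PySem

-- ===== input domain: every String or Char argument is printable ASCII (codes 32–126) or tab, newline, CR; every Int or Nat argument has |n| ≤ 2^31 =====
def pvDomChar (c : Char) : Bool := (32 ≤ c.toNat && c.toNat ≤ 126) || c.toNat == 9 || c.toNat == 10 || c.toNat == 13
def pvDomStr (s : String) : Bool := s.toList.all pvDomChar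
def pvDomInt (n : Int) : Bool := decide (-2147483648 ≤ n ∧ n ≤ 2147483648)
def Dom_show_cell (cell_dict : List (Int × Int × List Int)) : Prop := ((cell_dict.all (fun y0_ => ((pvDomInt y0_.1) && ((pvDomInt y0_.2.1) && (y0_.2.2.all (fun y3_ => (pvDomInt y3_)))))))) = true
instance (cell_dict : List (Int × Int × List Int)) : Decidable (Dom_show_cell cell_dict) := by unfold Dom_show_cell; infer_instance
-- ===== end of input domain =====

-- B replaces A's four max/min-with-key passes and full-grid scan (membership test + lookup at
-- every coordinate) by one running-extrema fold over the keys and one allocate-then-scatter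
-- pass over cell_dict.items(); same return value (objective: alternative).

-- ===== PORT A =====
def show_cell (cell_dict : List (Int × Int × List Int)) : List (List Int) :=
  let d : PySem.Dict (Int × Int) (List Int) :=
    PySem.Dict.ofList (cell_dict.map (fun p => ((p.1, p.2.1), p.2.2)))
  let xys := d.keys
  let max_x := ((PySem.List.max? xys (fun t => t.1)).getD (0, 0)).1
  let min_x := ((PySem.List.min? xys (fun t => t.1)).getD (0, 0)).1
  let max_y := ((PySem.List.max? xys (fun t => t.2)).getD (0, 0)).2
  let min_y := ((PySem.List.min? xys (fun t => t.2)).getD (0, 0)).2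
  let show_matix := (PySem.List.pyRange 0 (max_y - min_y + 1)).map
    (fun _ => PySem.List.pyRepeat [(0 : Int)] (max_x - min_x + 1))
  (PySem.List.pyRange 0 (max_y - min_y + 1)).foldl (fun m y =>
    (PySem.List.pyRange 0 (max_x - min_x + 1)).foldl (fun m x =>
      if d.contains (x + min_x, y + min_y) then
        m.modify y.toNat (fun row =>
          row.set x.toNat (PySem.List.pyGetD (d.getD (x + min_x, y + min_y) []) (-1) 0))
      else m) m) show_matix

-- ===== PORT B =====
def show_cell_alt (cell_dict : List (Int × Int × List Int)) : List (List Int) :=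
  let d : PySem.Dict (Int × Int) (List Int) :=
    PySem.Dict.ofList (cell_dict.map (fun p => ((p.1, p.2.1), p.2.2)))
  match d.keys with
  | [] => []   -- Python raises StopIteration here; Pre_ excludes the empty dict
  | k :: rest =>
    -- running extrema: min_x, max_x, min_y, max_y, seeded from the first key
    let e := rest.foldl (fun (a : Int × Int × Int × Int) q =>
      ((if q.1 < a.1 then q.1 else a.1),
       (if q.1 > a.2.1 then q.1 else a.2.1),
       (if q.2 < a.2.2.1 then q.2 else a.2.2.1),
       (if q.2 > a.2.2.2 then q.2 else a.2.2.2))) (k.1, k.1, k.2, k.2)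
    let show_matix := (PySem.List.pyRange 0 (e.2.2.2 - e.2.2.1 + 1)).map
      (fun _ => PySem.List.pyRepeat [(0 : Int)] (e.2.1 - e.1 + 1))
    d.items.foldl (fun m p =>
      m.modify (p.1.2 - e.2.2.1).toNat (fun row =>
        row.set (p.1.1 - e.1).toNat (PySem.List.pyGetD p.2 (-1) 0))) show_matix

-- ===== PRECONDITION & SPEC =====
-- Pre_ excludes the empty dict (A's max()/min() raise ValueError, B's next() raises
-- StopIteration) and dicts with an empty value list (val[-1] raises IndexError); everywhere
-- else the Python A returns normally.
def Pre_show_cell (cell_dict : List (Int × Int × List Int)) : Prop :=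
  cell_dict ≠ [] ∧
  ∀ v ∈ (PySem.Dict.ofList (cell_dict.map (fun p => ((p.1, p.2.1), p.2.2)))).values, v ≠ []
instance (cell_dict : List (Int × Int × List Int)) : Decidable (Pre_show_cell cell_dict) := by
  unfold Pre_show_cell; infer_instance
def pvWitness_show_cell : (List (Int × Int × List Int)) := [(0, 0, [3]), (1, 1, [1, 2])]

def Spec_show_cell (cell_dict : List (Int × Int × List Int)) (out : List (List Int)) : Prop := out = show_cell_alt cell_dict
instance (cell_dict : List (Int × Int × List Int)) (out : List (List Int)) : Decidable (Spec_show_cell cell_dict out) := by unfold Spec_show_cell; infer_instance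

-- ===== CLAIM (what is proved, stated in full; the proofs are below) =====
def Claim_equal_show_cell : Prop := ∀ (cell_dict : List (Int × Int × List Int)), Dom_show_cell cell_dict → Pre_show_cell cell_dict → Spec_show_cell cell_dict (show_cell cell_dict)

-- ===== LEMMAS AND PROOFS =====

lemma pv_modify_modify {α : Type} (l : List α) (j : Nat) (f g : α → α) :
    (l.modify j f).modify j g = l.modify j (fun a => g (f a)) := by
  apply List.ext_getElem
  · simp
  · intro i h1 h2
    simp only [List.getElem_modify]
    split_ifs <;> rfl

lemma pv_modify_id {α : Type} (l : List α) (j : Nat) : l.modify j (fun a => a) = l := by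
  apply List.ext_getElem
  · simp
  · intro i h1 h2
    simp [List.getElem_modify]

lemma pv_foldl_modify {α β : Type} (xs : List β) (j : Nat) (step : β → α → α) :
    ∀ (m : List α),
      xs.foldl (fun m x => m.modify j (step x)) m
        = m.modify j (fun r => xs.foldl (fun r x => step x r) r) := by
  induction xs with
  | nil => intro m; simp [pv_modify_id]
  | cons x xs ih =>
    intro m
    simp only [List.foldl_cons]
    rw [ih, pv_modify_modify]

lemma pv_map_range_set (W j : Int) (g : Int → Int) (v : Int) (h0 : 0 ≤ j) (_hW : j < W) :
    ((PySem.List.pyRange 0 W).map g).set j.toNat v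
      = (PySem.List.pyRange 0 W).map (fun x => if x = j then v else g x) := by
  apply List.ext_getElem
  · simp
  · intro i h1 h2
    have hi : i < (PySem.List.pyRange 0 W).length := by simpa using h2
    simp only [List.getElem_set, List.getElem_map, PySem.List.getElem_pyRange_one]
    have hlen : i < (W - 0).toNat := by simpa [PySem.List.length_pyRange_one] using hi
    split_ifs with ha hb hb
    · rfl
    · exfalso; omega
    · exfalso; omega
    · rfl

lemma pv_map_range_modify {α : Type} (H j : Int) (g : Int → α) (f : α → α)
    (h0 : 0 ≤ j) (_hH : j < H) :
    ((PySem.List.pyRange 0 H).map g).modify j.toNat f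
      = (PySem.List.pyRange 0 H).map (fun y => if y = j then f (g j) else g y) := by
  apply List.ext_getElem
  · simp
  · intro i h1 h2
    have hi : i < (PySem.List.pyRange 0 H).length := by simpa using h2
    simp only [List.getElem_modify, List.getElem_map, PySem.List.getElem_pyRange_one]
    have hlen : i < (H - 0).toNat := by simpa [PySem.List.length_pyRange_one] using hi
    split_ifs with ha hb hb
    · have : (0 : Int) + i = j := hb
      rw [this]
    · exfalso; omega
    · exfalso; omega
    · rfl

lemma pv_row_scatter (W : Int) (c : Int → Bool) (v : Int → Int) (g : Int → Int) :
    ∀ (b : Int) (_hb : 0 ≤ b), b ≤ W →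
      (PySem.List.pyRange 0 b).foldl
          (fun r x => if c x then r.set x.toNat (v x) else r)
          ((PySem.List.pyRange 0 W).map g)
        = (PySem.List.pyRange 0 W).map (fun x => if x < b ∧ c x then v x else g x) := by
  intro b hb
  induction b, hb using Int.le_induction with
  | base =>
    intro _
    rw [PySem.List.pyRange_one_eq_nil (le_refl 0)]
    simp only [List.foldl_nil]
    apply List.map_congr_left
    intro a ha
    have := PySem.List.mem_pyRange_one.mp ha
    have hlt : ¬ (a < 0 ∧ c a) := by rintro ⟨h, _⟩; omega
    rw [if_neg hlt]
  | succ b hb ih =>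
    intro hbW
    rw [PySem.List.pyRange_one_succ_right hb, List.foldl_append, ih (by omega)]
    simp only [List.foldl_cons, List.foldl_nil]
    by_cases hc : c b
    · rw [if_pos hc, pv_map_range_set W b _ _ hb (by omega)]
      apply List.map_congr_left
      intro a ha
      have hmem := PySem.List.mem_pyRange_one.mp ha
      by_cases hab : a = b
      · subst hab
        rw [if_pos rfl, if_pos ⟨by omega, hc⟩]
      · rw [if_neg hab]
        by_cases hca : c a
        · by_cases hless : a < b
          · rw [if_pos ⟨hless, hca⟩, if_pos ⟨by omega, hca⟩]
          · rw [if_neg (by rintro ⟨h, _⟩; exact hless h),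
                if_neg (by rintro ⟨h, _⟩; exact hab (by omega))]
        · rw [if_neg (by rintro ⟨_, h⟩; exact hca h), if_neg (by rintro ⟨_, h⟩; exact hca h)]
    · rw [if_neg hc]
      apply List.map_congr_left
      intro a ha
      by_cases hca : c a
      · by_cases hless : a < b
        · rw [if_pos ⟨hless, hca⟩, if_pos ⟨by omega, hca⟩]
        · rw [if_neg (by rintro ⟨h, _⟩; exact hless h),
              if_neg (by rintro ⟨h, _⟩; exact hless (by
                rcases eq_or_lt_of_le (Int.lt_add_one_iff.mp h) with h' | h'
                · exact absurd (h' ▸ hca) (by simpa using hc)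
                · exact h'))]
      · rw [if_neg (by rintro ⟨_, h⟩; exact hca h), if_neg (by rintro ⟨_, h⟩; exact hca h)]

lemma pv_col_scatter {α : Type} (H : Int) (F : Int → α → α) (R : Int → α) :
    ∀ (b : Int) (_hb : 0 ≤ b), b ≤ H →
      (PySem.List.pyRange 0 b).foldl (fun m y => m.modify y.toNat (F y))
          ((PySem.List.pyRange 0 H).map R)
        = (PySem.List.pyRange 0 H).map (fun y => if y < b then F y (R y) else R y) := by
  intro b hb
  induction b, hb using Int.le_induction with
  | base =>
    intro _
    rw [PySem.List.pyRange_one_eq_nil (le_refl 0)]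
    simp only [List.foldl_nil]
    apply List.map_congr_left
    intro a ha
    rw [if_neg (by have := PySem.List.mem_pyRange_one.mp ha; omega)]
  | succ b hb ih =>
    intro hbW
    rw [PySem.List.pyRange_one_succ_right hb, List.foldl_append, ih (by omega)]
    simp only [List.foldl_cons, List.foldl_nil]
    rw [pv_map_range_modify H b _ _ hb (by omega)]
    apply List.map_congr_left
    intro a ha
    have hmem := PySem.List.mem_pyRange_one.mp ha
    by_cases hab : a = b
    · subst hab
      rw [if_pos rfl, if_neg (lt_irrefl a), if_pos (by omega)]
    · rw [if_neg hab]
      by_cases hless : a < b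
      · rw [if_pos hless, if_pos (by omega)]
      · rw [if_neg hless, if_neg (by intro h; exact hab (by omega))]

lemma pv_foldl_nomatch {β γ : Type} (l : List β) (cond : β → Prop) [DecidablePred cond]
    (f : β → γ) (z : γ) (h : ∀ p ∈ l, ¬ cond p) :
    l.foldl (fun acc p => if cond p then f p else acc) z = z := by
  induction l generalizing z with
  | nil => rfl
  | cons p l ih =>
    simp only [List.foldl_cons]
    rw [if_neg (h p (List.mem_cons_self)), ih _ (fun q hq => h q (List.mem_cons_of_mem _ hq))]

lemma pv_items_lastmatch (d : PySem.Dict (Int × Int) (List Int)) (k : Int × Int)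
    (hnd : d.keys.Nodup) :
    d.items.foldl
        (fun acc p => if p.1.1 = k.1 ∧ p.1.2 = k.2 then PySem.List.pyGetD p.2 (-1) 0 else acc) 0
      = if d.contains k then PySem.List.pyGetD (d.getD k []) (-1) 0 else 0 := by
  have hcond : ∀ p : (Int × Int) × List Int, (p.1.1 = k.1 ∧ p.1.2 = k.2) ↔ p.1 = k := by
    intro p; rw [Prod.ext_iff]
  by_cases hc : d.contains k
  · rw [if_pos hc]
    have hsome : ∃ v, d.get? k = some v := by
      cases hg : d.get? k with
      | none =>
        exact absurd ((PySem.Dict.get?_eq_none_iff_not_mem_keys d k).mp hg)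
          (by simpa using (PySem.Dict.contains_iff_mem_keys d k).mp hc)
      | some v => exact ⟨v, rfl⟩
    obtain ⟨v, hv⟩ := hsome
    rw [PySem.Dict.getD_of_get?_eq_some d [] hv]
    have hmem : (k, v) ∈ d.items := PySem.Dict.mem_items_of_get?_eq_some d hv
    obtain ⟨l1, l2, hsplit⟩ := List.append_of_mem hmem
    have hkeys : d.keys = d.items.map (·.1) := rfl
    have hnd' : (l1.map (·.1) ++ k :: l2.map (·.1)).Nodup := by
      have := hnd
      rw [hkeys, hsplit] at this
      simpa using this
    have hl2 : ∀ p ∈ l2, p.1 ≠ k := by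
      intro p hp he
      have hk : k ∈ l2.map (·.1) := by
        exact List.mem_map.mpr ⟨p, hp, he⟩
      have := (List.nodup_append.mp hnd').2.1
      exact (List.nodup_cons.mp this).1 hk
    rw [hsplit, List.foldl_append]
    simp only [List.foldl_cons]
    rw [if_pos (by simp)]
    exact pv_foldl_nomatch l2 _ _ _ (fun p hp h => hl2 p hp ((hcond p).mp h))
  · rw [if_neg hc]
    have hnk : k ∉ d.keys := by
      intro h
      exact hc ((PySem.Dict.contains_iff_mem_keys d k).mpr h)
    apply pv_foldl_nomatch
    intro p hp h
    apply hnk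
    rw [show d.keys = d.items.map (·.1) from rfl]
    exact List.mem_map.mpr ⟨p, hp, (hcond p).mp h⟩

lemma pv_scatter (H W min_x min_y : Int) :
    ∀ (l : List ((Int × Int) × List Int)) (M : Int → Int → Int),
      (∀ p ∈ l, 0 ≤ p.1.2 - min_y ∧ p.1.2 - min_y < H ∧ 0 ≤ p.1.1 - min_x ∧ p.1.1 - min_x < W) →
      l.foldl (fun m p =>
          m.modify (p.1.2 - min_y).toNat (fun row =>
            row.set (p.1.1 - min_x).toNat (PySem.List.pyGetD p.2 (-1) 0)))
        ((PySem.List.pyRange 0 H).map (fun y => (PySem.List.pyRange 0 W).map (fun x => M y x)))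
      = (PySem.List.pyRange 0 H).map (fun y => (PySem.List.pyRange 0 W).map (fun x =>
          l.foldl (fun acc p =>
            if p.1.1 = x + min_x ∧ p.1.2 = y + min_y then PySem.List.pyGetD p.2 (-1) 0 else acc)
            (M y x))) := by
  intro l
  induction l with
  | nil => intro M _; simp
  | cons p l ih =>
    intro M hbd
    have hp := hbd p (List.mem_cons_self)
    simp only [List.foldl_cons]
    rw [pv_map_range_modify H (p.1.2 - min_y) _ _ hp.1 hp.2.1]
    have hstep :
        ((PySem.List.pyRange 0 H).map (fun y =>
          if y = p.1.2 - min_y then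
            ((PySem.List.pyRange 0 W).map (fun x => M (p.1.2 - min_y) x)).set
              (p.1.1 - min_x).toNat (PySem.List.pyGetD p.2 (-1) 0)
          else (PySem.List.pyRange 0 W).map (fun x => M y x)))
        = (PySem.List.pyRange 0 H).map (fun y => (PySem.List.pyRange 0 W).map (fun x =>
            (fun y x => if y = p.1.2 - min_y ∧ x = p.1.1 - min_x
              then PySem.List.pyGetD p.2 (-1) 0 else M y x) y x)) := by
      apply List.map_congr_left
      intro y hy
      by_cases hyp : y = p.1.2 - min_y
      · rw [if_pos hyp, pv_map_range_set W (p.1.1 - min_x) _ _ hp.2.2.1 hp.2.2.2]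
        apply List.map_congr_left
        intro x hx
        by_cases hxp : x = p.1.1 - min_x
        · simp [hyp, hxp]
        · simp [hyp, hxp]
      · rw [if_neg hyp]
        apply List.map_congr_left
        intro x hx
        simp [hyp]
    rw [hstep, ih _ (fun q hq => hbd q (List.mem_cons_of_mem _ hq))]
    apply List.map_congr_left
    intro y hy
    apply List.map_congr_left
    intro x hx
    congr 1
    by_cases hm : p.1.1 = x + min_x ∧ p.1.2 = y + min_y
    · rw [if_pos hm, if_pos (by omega)]
    · rw [if_neg hm, if_neg (by intro h; exact hm (by omega))]

lemma pv_zero_row (W : Int) :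
    PySem.List.pyRepeat [(0 : Int)] W = (PySem.List.pyRange 0 W).map (fun _ => (0 : Int)) := by
  rw [PySem.List.pyRepeat_singleton]
  apply List.ext_getElem
  · simp [PySem.List.length_pyRange_one]
  · intro i h1 h2
    simp

lemma pv_core (d : PySem.Dict (Int × Int) (List Int)) (max_x min_x max_y min_y : Int)
    (hnd : d.keys.Nodup)
    (hH : 0 ≤ max_y - min_y + 1) (hW : 0 ≤ max_x - min_x + 1)
    (hb : ∀ k ∈ d.keys, min_x ≤ k.1 ∧ k.1 ≤ max_x ∧ min_y ≤ k.2 ∧ k.2 ≤ max_y) :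
    (PySem.List.pyRange 0 (max_y - min_y + 1)).foldl (fun m y =>
      (PySem.List.pyRange 0 (max_x - min_x + 1)).foldl (fun m x =>
        if d.contains (x + min_x, y + min_y) then
          m.modify y.toNat (fun row =>
            row.set x.toNat (PySem.List.pyGetD (d.getD (x + min_x, y + min_y) []) (-1) 0))
        else m) m)
      ((PySem.List.pyRange 0 (max_y - min_y + 1)).map
        (fun _ => PySem.List.pyRepeat [(0 : Int)] (max_x - min_x + 1)))
    = d.items.foldl (fun m p =>
        m.modify (p.1.2 - min_y).toNat (fun row =>
          row.set (p.1.1 - min_x).toNat (PySem.List.pyGetD p.2 (-1) 0)))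
        ((PySem.List.pyRange 0 (max_y - min_y + 1)).map
          (fun _ => PySem.List.pyRepeat [(0 : Int)] (max_x - min_x + 1))) := by
  have hrow := pv_zero_row (max_x - min_x + 1)
  rw [hrow]
  have houter :
      (fun (m : List (List Int)) (y : Int) =>
        (PySem.List.pyRange 0 (max_x - min_x + 1)).foldl (fun m x =>
          if d.contains (x + min_x, y + min_y) then
            m.modify y.toNat (fun row =>
              row.set x.toNat (PySem.List.pyGetD (d.getD (x + min_x, y + min_y) []) (-1) 0))
          else m) m)
      = (fun m y => m.modify y.toNat (fun r =>
          (PySem.List.pyRange 0 (max_x - min_x + 1)).foldl (fun r x =>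
            if d.contains (x + min_x, y + min_y) then
              r.set x.toNat (PySem.List.pyGetD (d.getD (x + min_x, y + min_y) []) (-1) 0)
            else r) r)) := by
    funext m y
    have h1 :
        (fun (m : List (List Int)) (x : Int) =>
          if d.contains (x + min_x, y + min_y) then
            m.modify y.toNat (fun row =>
              row.set x.toNat (PySem.List.pyGetD (d.getD (x + min_x, y + min_y) []) (-1) 0))
          else m)
        = (fun m x => m.modify y.toNat (fun r =>
            if d.contains (x + min_x, y + min_y) then
              r.set x.toNat (PySem.List.pyGetD (d.getD (x + min_x, y + min_y) []) (-1) 0)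
            else r)) := by
      funext m x
      by_cases hc : d.contains (x + min_x, y + min_y)
      · simp [hc]
      · simp [hc, pv_modify_id]
    rw [h1, pv_foldl_modify]
  rw [houter, pv_col_scatter (max_y - min_y + 1) _ _ (max_y - min_y + 1) hH (le_refl _)]
  rw [pv_scatter (max_y - min_y + 1) (max_x - min_x + 1) min_x min_y d.items _
    (by
      intro p hp
      have hk : p.1 ∈ d.keys := by
        rw [show d.keys = d.items.map (·.1) from rfl]
        exact List.mem_map.mpr ⟨p, hp, rfl⟩
      have := hb p.1 hk
      omega)]
  apply List.map_congr_left
  intro y hy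
  have hymem := PySem.List.mem_pyRange_one.mp hy
  rw [if_pos (by omega),
    pv_row_scatter (max_x - min_x + 1) _ _ _ (max_x - min_x + 1) hW (le_refl _)]
  apply List.map_congr_left
  intro x hx
  have hxmem := PySem.List.mem_pyRange_one.mp hx
  have := pv_items_lastmatch d (x + min_x, y + min_y) hnd
  simp only [] at this
  rw [this]
  by_cases hc : d.contains (x + min_x, y + min_y)
  · rw [if_pos ⟨by omega, hc⟩, if_pos hc]
  · rw [if_neg (by rintro ⟨_, h⟩; exact hc h), if_neg hc]

-- B's four-way running-extrema fold, componentwise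
lemma pv_fold4 (rest : List (Int × Int)) :
    ∀ (a b c e : Int),
      rest.foldl (fun (s : Int × Int × Int × Int) q =>
        ((if q.1 < s.1 then q.1 else s.1),
         (if q.1 > s.2.1 then q.1 else s.2.1),
         (if q.2 < s.2.2.1 then q.2 else s.2.2.1),
         (if q.2 > s.2.2.2 then q.2 else s.2.2.2))) (a, b, c, e)
      = ((rest.map (·.1)).foldl min a, (rest.map (·.1)).foldl max b,
         (rest.map (·.2)).foldl min c, (rest.map (·.2)).foldl max e) := by
  induction rest with
  | nil => intro a b c e; rfl
  | cons q rest ih =>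
    intro a b c e
    simp only [List.foldl_cons, List.map_cons]
    rw [ih]
    have h1 : (if q.1 < a then q.1 else a) = min a q.1 := by omega
    have h2 : (if q.1 > b then q.1 else b) = max b q.1 := by omega
    have h3 : (if q.2 < c then q.2 else c) = min c q.2 := by omega
    have h4 : (if q.2 > e then q.2 else e) = max e q.2 := by omega
    rw [h1, h2, h3, h4]

lemma pv_max_key (f : Int × Int → Int) (k : Int × Int) (rest : List (Int × Int)) :
    f ((PySem.List.max? (k :: rest) f).getD (0, 0)) = (rest.map f).foldl max (f k) := by
  cases hm : PySem.List.max? (k :: rest) f with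
  | none => exact absurd ((PySem.List.max?_eq_none_iff _ _).mp hm) (by simp)
  | some m =>
    simp only [Option.getD_some]
    have hmem := PySem.List.max?_mem hm
    have hub := PySem.List.max?_isMax hm
    have hF := PySem.List.le_foldl_max (rest.map f) (f k)
    apply le_antisymm
    · rcases List.mem_cons.mp hmem with h | h
      · rw [h]; exact hF.1
      · exact hF.2 (f m) (List.mem_map.mpr ⟨m, h, rfl⟩)
    · rcases PySem.List.foldl_max_mem (rest.map f) (f k) with h | h
      · rw [h]; exact hub k (List.mem_cons_self)
      · obtain ⟨z, hz, hzf⟩ := List.mem_map.mp h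
        rw [← hzf]; exact hub z (List.mem_cons_of_mem _ hz)

lemma pv_min_key (f : Int × Int → Int) (k : Int × Int) (rest : List (Int × Int)) :
    f ((PySem.List.min? (k :: rest) f).getD (0, 0)) = (rest.map f).foldl min (f k) := by
  cases hm : PySem.List.min? (k :: rest) f with
  | none => exact absurd ((PySem.List.min?_eq_none_iff _ _).mp hm) (by simp)
  | some m =>
    simp only [Option.getD_some]
    have hmem := PySem.List.min?_mem hm
    have hlb := PySem.List.min?_isMin hm
    have hF := PySem.List.foldl_min_le (rest.map f) (f k)
    apply le_antisymm
    · rcases PySem.List.foldl_min_mem (rest.map f) (f k) with h | h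
      · rw [h]; exact hlb k (List.mem_cons_self)
      · obtain ⟨z, hz, hzf⟩ := List.mem_map.mp h
        rw [← hzf]; exact hlb z (List.mem_cons_of_mem _ hz)
    · rcases List.mem_cons.mp hmem with h | h
      · rw [h]; exact hF.1
      · exact hF.2 (f m) (List.mem_map.mpr ⟨m, h, rfl⟩)

theorem pv_eq_pre (cell_dict : List (Int × Int × List Int)) (hne : cell_dict ≠ []) :
    show_cell cell_dict = show_cell_alt cell_dict := by
  simp only [show_cell, show_cell_alt]
  set d : PySem.Dict (Int × Int) (List Int) :=
    PySem.Dict.ofList (cell_dict.map (fun p => ((p.1, p.2.1), p.2.2))) with hd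
  have hnd : d.keys.Nodup := PySem.Dict.nodup_keys_ofList _
  have hkeys_ne : d.keys ≠ [] := by
    obtain ⟨p, rest, hc⟩ := List.exists_cons_of_ne_nil hne
    have hmemk : ((p.1, p.2.1) : Int × Int) ∈ d.keys := by
      rw [hd, show (PySem.Dict.ofList (cell_dict.map (fun p => ((p.1, p.2.1), p.2.2)))).keys
            = PySem.Set.update [] ((cell_dict.map (fun p => ((p.1, p.2.1), p.2.2))).map (·.1))
          from PySem.Dict.keys_foldl_insert_key _ _ _ _]
      rw [PySem.Set.mem_update]
      right
      exact List.mem_map.mpr ⟨((p.1, p.2.1), p.2.2),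
        List.mem_map.mpr ⟨p, by rw [hc]; exact List.mem_cons_self, rfl⟩, rfl⟩
    exact List.ne_nil_of_mem hmemk
  obtain ⟨k, rest, hk⟩ := List.exists_cons_of_ne_nil hkeys_ne
  rw [hk]
  simp only [pv_fold4]
  rw [pv_max_key (fun t => t.1) k rest, pv_min_key (fun t => t.1) k rest,
      pv_max_key (fun t => t.2) k rest, pv_min_key (fun t => t.2) k rest]
  set max_x := (rest.map (fun t : Int × Int => t.1)).foldl max k.1 with hmax_x
  set min_x := (rest.map (fun t : Int × Int => t.1)).foldl min k.1 with hmin_x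
  set max_y := (rest.map (fun t : Int × Int => t.2)).foldl max k.2 with hmax_y
  set min_y := (rest.map (fun t : Int × Int => t.2)).foldl min k.2 with hmin_y
  have hbx := PySem.List.le_foldl_max (rest.map (fun t : Int × Int => t.1)) k.1
  have hlx := PySem.List.foldl_min_le (rest.map (fun t : Int × Int => t.1)) k.1
  have hby := PySem.List.le_foldl_max (rest.map (fun t : Int × Int => t.2)) k.2
  have hly := PySem.List.foldl_min_le (rest.map (fun t : Int × Int => t.2)) k.2
  have hb : ∀ q ∈ d.keys, min_x ≤ q.1 ∧ q.1 ≤ max_x ∧ min_y ≤ q.2 ∧ q.2 ≤ max_y := by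
    intro q hq
    rw [hk] at hq
    rcases List.mem_cons.mp hq with h | h
    · subst h
      exact ⟨hlx.1, hbx.1, hly.1, hby.1⟩
    · exact ⟨hlx.2 q.1 (List.mem_map.mpr ⟨q, h, rfl⟩), hbx.2 q.1 (List.mem_map.mpr ⟨q, h, rfl⟩),
             hly.2 q.2 (List.mem_map.mpr ⟨q, h, rfl⟩), hby.2 q.2 (List.mem_map.mpr ⟨q, h, rfl⟩)⟩
  have hH : 0 ≤ max_y - min_y + 1 := by
    have := hb k (hk ▸ List.mem_cons_self)
    omega
  have hW : 0 ≤ max_x - min_x + 1 := by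
    have := hb k (hk ▸ List.mem_cons_self)
    omega
  exact pv_core d max_x min_x max_y min_y hnd hH hW hb

-- ===== VERDICT (by name: the statement is the Claim_ definition above) =====
theorem show_cell_spec : Claim_equal_show_cell := by
  intro cell_dict _ hpre
  unfold Spec_show_cell
  exact pv_eq_pre cell_dict hpre.1
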